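-- pv_equiv track=rewrite | github.com/seokhyu-n/cvrp-road-demo | api/app.py | _clean_path
-- ===== SOURCE A (Python) =====
-- from typing import List, Optional, Tuple, Dict, Any
--
-- def _clean_path(path: List[int], n_nodes: int) -> List[int]:
--     """
--     ✅ 디버그/로그 가독성을 위해 정리:
--     - int로 캐스팅
--     - [0..n-1] 범위 밖 제거
--     - 연속 0 압축
--     - 마지막 의미 있는 방문 뒤로 trailing 0 제거 후, 끝은 0으로 보정
--     """
--     p = []
--     for v in path:
--         try:
--             iv = int(v)
--         except:
--             continue
--         if 0 <= iv < n_nodes: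
--             p.append(iv)
--
--     if not p:
--         return [0, 0]
--
--     # 연속 0 압축
--     compact = [p[0]]
--     for v in p[1:]:
--         if v == 0 and compact[-1] == 0:
--             continue
--         compact.append(v)
--
--     # trailing 0 제거(마지막 고객 뒤까지만 남김)
--     last_nonzero = -1
--     for i in range(len(compact) - 1, -1, -1):
--         if compact[i] != 0:
--             last_nonzero = i
--             break
--
--     if last_nonzero == -1:
--         return [0, 0]
--
--     compact = compact[: last_nonzero + 1]
--
--     # 시작/끝 depot 보정
--     if compact[0] != 0:
--         compact = [0] + compact
--     if compact[-1] != 0: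
--         compact = compact + [0]
--
--     return compact
-- ===== SOURCE B (Python) =====
-- from typing import List
--
-- def _clean_path(path: List[int], n_nodes: int) -> List[int]:
--     # Split the in-range values into maximal runs of nonzero nodes (zeros act
--     # as separators), then emit: depot, each run followed by a depot visit.
--     runs = []
--     cur = []
--     for v in path:
--         if not (0 <= v < n_nodes):
--             continue
--         if v == 0:
--             if cur:
--                 runs.append(cur)
--                 cur = []
--         else:
--             cur.append(v)
--     if cur:
--         runs.append(cur)
--     if not runs:
--         return [0, 0]
--     out = [0]
--     for r in runs:
--         out.extend(r)
--         out.append(0)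
--     return out
-- ===== Notes on version B (the rewrite author's own statement) =====
-- stated objective: simpler
-- what changed: A's four sequential passes (filter, adjacent-zero compression, backward last-nonzero scan with slice, then two endpoint fix-ups) are replaced by one forward pass that splits the in-range values into maximal nonzero runs and emits each run followed by a depot 0 after a leading 0.
import Mathlib
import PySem

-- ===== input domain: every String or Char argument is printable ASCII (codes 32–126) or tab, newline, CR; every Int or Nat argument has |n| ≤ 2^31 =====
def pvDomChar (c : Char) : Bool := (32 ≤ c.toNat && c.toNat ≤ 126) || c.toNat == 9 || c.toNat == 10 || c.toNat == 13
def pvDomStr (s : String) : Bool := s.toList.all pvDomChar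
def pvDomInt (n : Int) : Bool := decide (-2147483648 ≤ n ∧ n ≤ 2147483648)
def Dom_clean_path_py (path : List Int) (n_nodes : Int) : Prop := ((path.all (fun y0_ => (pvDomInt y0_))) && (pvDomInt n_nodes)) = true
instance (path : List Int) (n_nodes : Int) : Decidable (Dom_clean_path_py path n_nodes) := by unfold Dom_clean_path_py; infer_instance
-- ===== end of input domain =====

-- B replaces A's compress / backward-scan / slice / endpoint-fixups after the filter by a
-- single pass grouping the kept values into maximal nonzero runs joined and wrapped by depot 0s
-- (objective: simpler). Return-value equivalence only (neither mutates its arguments).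

-- ===== PORT A =====
-- helper for A's backward 'for i in range(len(compact)-1,-1,-1): … break' scan
def pvLastNZ (c : List Int) : Nat → Int
  | 0 => -1
  | i+1 => if c.getD i 0 ≠ 0 then (i : Int) else pvLastNZ c i

def clean_path_py (path : List Int) (n_nodes : Int) : List Int :=
  -- p = []; for v in path: iv = int(v) (identity on ints, never raises); if 0 <= iv < n_nodes: p.append(iv)
  let p := path.foldl (fun acc v => if 0 ≤ v ∧ v < n_nodes then acc ++ [v] else acc) []
  match p with
  | [] => [0, 0]                                   -- if not p: return [0, 0]
  | h :: t =>
    -- compact = [p[0]]; for v in p[1:]: if v == 0 and compact[-1] == 0: continue; compact.append(v)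
    let compact := t.foldl (fun c v => if v = 0 ∧ c.getLastD 0 = 0 then c else c ++ [v]) [h]
    let last_nonzero := pvLastNZ compact compact.length
    if last_nonzero = -1 then [0, 0]
    else
      let compact2 := compact.take (last_nonzero + 1).toNat     -- compact[: last_nonzero + 1]
      let compact3 := if compact2.getD 0 0 ≠ 0 then 0 :: compact2 else compact2
      if compact3.getLastD 0 ≠ 0 then compact3 ++ [0] else compact3

-- ===== PORT B =====
def clean_path_py_alt (path : List Int) (n_nodes : Int) : List Int :=
  -- one pass: split kept values into maximal nonzero runs (state = (runs, cur))
  let st := path.foldl (fun (st : List (List Int) × List Int) v =>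
      if 0 ≤ v ∧ v < n_nodes then
        if v = 0 then (if st.2 ≠ [] then (st.1 ++ [st.2], ([] : List Int)) else st)
        else (st.1, st.2 ++ [v])
      else st) (([] : List (List Int)), ([] : List Int))
  let runs := if st.2 ≠ [] then st.1 ++ [st.2] else st.1
  if runs = [] then [0, 0]
  else runs.foldl (fun out r => out ++ r ++ [0]) [0]

-- ===== PRECONDITION & SPEC =====
def Spec_clean_path_py (path : List Int) (n_nodes : Int) (out : List Int) : Prop := out = clean_path_py_alt path n_nodes
instance (path : List Int) (n_nodes : Int) (out : List Int) : Decidable (Spec_clean_path_py path n_nodes out) := by unfold Spec_clean_path_py; infer_instance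

-- ===== CLAIM (what is proved, stated in full; the proofs are below) =====
def Claim_equal_clean_path_py : Prop := ∀ (path : List Int) (n_nodes : Int), Dom_clean_path_py path n_nodes → Spec_clean_path_py path n_nodes (clean_path_py path n_nodes)

-- ===== LEMMAS AND PROOFS =====

-- spec of A's zero-compression loop: the elements appended after `last`
def pvComp (last : Int) : List Int → List Int
  | [] => []
  | v :: t => if v = 0 ∧ last = 0 then pvComp last t else v :: pvComp v t

-- strip trailing zeros
def pvRstrip : List Int → List Int
  | [] => []
  | a :: x => if pvRstrip x = [] ∧ a = 0 then [] else a :: pvRstrip x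

-- maximal nonzero runs, with pending run `cur`
def pvRuns (cur : List Int) : List Int → List (List Int)
  | [] => if cur = [] then [] else [cur]
  | v :: t => if v = 0 then (if cur = [] then pvRuns [] t else cur :: pvRuns [] t)
              else pvRuns (cur ++ [v]) t

def pvJoin (rs : List (List Int)) : List Int := (rs.map (· ++ [0])).flatten

-- B's loop body / finalisation, as named functions (defeq to the port's lambdas)
def pvStep (st : List (List Int) × List Int) (v : Int) : List (List Int) × List Int :=
  if v = 0 then (if st.2 ≠ [] then (st.1 ++ [st.2], ([] : List Int)) else st)
  else (st.1, st.2 ++ [v])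

def pvFinal (st : List (List Int) × List Int) : List (List Int) :=
  if st.2 ≠ [] then st.1 ++ [st.2] else st.1

-- unfolding equations (stated so that `rw` keeps the conditions un-normalised)
theorem pvComp_cons (last v : Int) (t : List Int) :
    pvComp last (v :: t) = if v = 0 ∧ last = 0 then pvComp last t else v :: pvComp v t := rfl

theorem pvRstrip_cons (a : Int) (x : List Int) :
    pvRstrip (a :: x) = if pvRstrip x = [] ∧ a = 0 then [] else a :: pvRstrip x := rfl

theorem pvRuns_cons (cur : List Int) (v : Int) (t : List Int) :
    pvRuns cur (v :: t) = if v = 0 then (if cur = [] then pvRuns [] t else cur :: pvRuns [] t)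
                          else pvRuns (cur ++ [v]) t := rfl

theorem pvRuns_nil (cur : List Int) : pvRuns cur [] = if cur = [] then [] else [cur] := rfl

theorem pvLastNZ_succ (c : List Int) (i : Nat) :
    pvLastNZ c (i + 1) = if c.getD i 0 ≠ 0 then (i : Int) else pvLastNZ c i := rfl

theorem pvJoin_cons (r : List Int) (rs : List (List Int)) :
    pvJoin (r :: rs) = r ++ [0] ++ pvJoin rs := by simp [pvJoin]

theorem pv_getLastD_cons_ne {r : List Int} (a d d' : Int) (h : r ≠ []) :
    (a :: r).getLastD d = r.getLastD d' := by
  cases r with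
  | nil => exact absurd rfl h
  | cons b s => simp [List.getLastD]

theorem pv_getD_concat (l : List Int) (a d : Int) : (l ++ [a]).getD l.length d = a := by
  simp [List.getD]

-- A's compression fold in terms of pvComp
theorem pv_compactFold (t : List Int) : ∀ (c : List Int), c ≠ [] →
    t.foldl (fun c v => if v = 0 ∧ c.getLastD 0 = 0 then c else c ++ [v]) c
      = c ++ pvComp (c.getLastD 0) t := by
  induction t with
  | nil => intro c _; simp [pvComp]
  | cons v t ih =>
    intro c hc
    rw [List.foldl_cons, pvComp_cons]
    by_cases h : v = 0 ∧ c.getLastD 0 = 0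
    · rw [if_pos h, if_pos h]
      exact ih c hc
    · rw [if_neg h, if_neg h, ih (c ++ [v]) (by simp), List.getLastD_concat]
      simp

-- ---- the backward scan computes pvRstrip ----

theorem pvLastNZ_lt : ∀ (i : Nat) (c : List Int),
    pvLastNZ c i = -1 ∨ (0 ≤ pvLastNZ c i ∧ pvLastNZ c i < i) := by
  intro i c
  induction i with
  | zero => left; rfl
  | succ i ih =>
    rw [pvLastNZ_succ]
    by_cases h : c.getD i 0 = 0
    · rw [if_neg (fun hc => hc h)]
      rcases ih with h1 | h1
      · left; exact h1
      · right; omega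
    · rw [if_pos h]
      right; omega

theorem pvLastNZ_append (a : Int) : ∀ (i : Nat) (c : List Int), i ≤ c.length →
    pvLastNZ (c ++ [a]) i = pvLastNZ c i := by
  intro i
  induction i with
  | zero => intro c _; rfl
  | succ i ih =>
    intro c hle
    have hi : i < c.length := by omega
    simp only [pvLastNZ, List.getD_append _ _ _ _ hi]
    rw [ih c (by omega)]

theorem pvRstrip_concat_nz (a : Int) (ha : a ≠ 0) : ∀ (c : List Int), pvRstrip (c ++ [a]) = c ++ [a] := by
  intro c
  induction c with
  | nil => simp [pvRstrip, ha]
  | cons x d ih => simp only [List.cons_append, pvRstrip, ih]; simp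

theorem pvRstrip_concat_z : ∀ (c : List Int), pvRstrip (c ++ [0]) = pvRstrip c := by
  intro c
  induction c with
  | nil => simp [pvRstrip]
  | cons x d ih => simp only [List.cons_append, pvRstrip, ih]

theorem pvLastNZ_main : ∀ (c : List Int),
    (pvLastNZ c c.length = -1 ∧ pvRstrip c = []) ∨
    (0 ≤ pvLastNZ c c.length ∧ c.take ((pvLastNZ c c.length).toNat + 1) = pvRstrip c) := by
  intro c
  induction c using List.reverseRecOn with
  | nil => left; exact ⟨rfl, rfl⟩
  | append_singleton d a ih =>
    have hlen : (d ++ [a]).length = d.length + 1 := by simp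
    have e1 : pvLastNZ (d ++ [a]) ((d ++ [a]).length)
        = if a ≠ 0 then (d.length : Int) else pvLastNZ d d.length := by
      rw [hlen, pvLastNZ_succ]
      by_cases ha : a = 0
      · rw [if_neg (fun hc => hc (by rw [pv_getD_concat]; exact ha)),
            if_neg (fun hc => hc ha), pvLastNZ_append a d.length d le_rfl]
      · rw [if_pos (show (d ++ [a]).getD d.length 0 ≠ 0 by rw [pv_getD_concat]; exact ha), if_pos ha]
    rw [e1]
    by_cases ha : a = 0
    · subst ha
      rw [if_neg (by simp : ¬((0 : Int) ≠ 0)), pvRstrip_concat_z]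
      rcases ih with ⟨h1, h2⟩ | ⟨h1, h2⟩
      · left; exact ⟨h1, h2⟩
      · right
        refine ⟨h1, ?_⟩
        rcases pvLastNZ_lt d.length d with hb | hb
        · omega
        · rw [List.take_append_of_le_length (by omega)]
          exact h2
    · rw [if_pos ha, pvRstrip_concat_nz a ha]
      right
      refine ⟨by omega, ?_⟩
      have h3 : ((d.length : Int)).toNat + 1 = d.length + 1 := by omega
      rw [h3, List.take_of_length_le (by simp)]

theorem pvRstrip_last_ne (c : List Int) (h : pvRstrip c ≠ []) : (pvRstrip c).getLastD 0 ≠ 0 := by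
  induction c with
  | nil => exact absurd rfl h
  | cons a d ih =>
    rw [pvRstrip_cons] at h ⊢
    by_cases hc : pvRstrip d = [] ∧ a = 0
    · rw [if_pos hc] at h; exact absurd rfl h
    · rw [if_neg hc]
      by_cases hd : pvRstrip d = []
      · have ha : a ≠ 0 := fun ha => hc ⟨hd, ha⟩
        rw [hd]
        simpa [List.getLastD] using ha
      · rw [pv_getLastD_cons_ne a 0 0 hd]
        exact ih hd

-- ---- emptiness characterisations ----

theorem pvRstrip_nil_iff : ∀ (c : List Int), pvRstrip c = [] ↔ ∀ x ∈ c, x = 0 := by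
  intro c
  induction c with
  | nil => simp [pvRstrip]
  | cons a d ih =>
    rw [pvRstrip_cons]
    constructor
    · intro h
      by_cases hc : pvRstrip d = [] ∧ a = 0
      · intro x hx
        rcases List.mem_cons.mp hx with h1 | h1
        · exact h1.trans hc.2
        · exact (ih.mp hc.1) x h1
      · rw [if_neg hc] at h; simp at h
    · intro h
      have h1 : pvRstrip d = [] := ih.mpr (fun x hx => h x (List.mem_cons_of_mem _ hx))
      have h2 : a = 0 := h a List.mem_cons_self
      rw [if_pos ⟨h1, h2⟩]

theorem pvComp_mem (x : Int) (hx : x ≠ 0) : ∀ (u : List Int) (last : Int), x ∈ u → x ∈ pvComp last u := by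
  intro u
  induction u with
  | nil => intro last h; simp at h
  | cons v t ih =>
    intro last h
    rw [pvComp_cons]
    by_cases hc : v = 0 ∧ last = 0
    · rw [if_pos hc]
      rcases List.mem_cons.mp h with h1 | h1
      · exact absurd (h1.trans hc.1) hx
      · exact ih last h1
    · rw [if_neg hc]
      rcases List.mem_cons.mp h with h1 | h1
      · simp [h1]
      · exact List.mem_cons_of_mem _ (ih v h1)

theorem pvComp_all_zero : ∀ (u : List Int), (∀ x ∈ u, x = 0) → pvComp 0 u = [] := by
  intro u
  induction u with
  | nil => intro _; rfl
  | cons v t ih =>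
    intro h
    have hv : v = 0 := h v List.mem_cons_self
    rw [pvComp_cons, if_pos ⟨hv, rfl⟩]
    exact ih (fun x hx => h x (List.mem_cons_of_mem _ hx))

theorem pvRstrip_comp_nil_iff (u : List Int) : pvRstrip (pvComp 0 u) = [] ↔ ∀ x ∈ u, x = 0 := by
  constructor
  · intro h x hx
    by_contra hne
    exact hne ((pvRstrip_nil_iff _).mp h x (pvComp_mem x hne u 0 hx))
  · intro h; rw [pvComp_all_zero u h]; rfl

theorem pvRuns_cons_ne : ∀ (p : List Int) (cur : List Int), cur ≠ [] → pvRuns cur p ≠ [] := by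
  intro p
  induction p with
  | nil => intro cur hc; rw [pvRuns_nil, if_neg hc]; simp
  | cons v t ih =>
    intro cur hc
    rw [pvRuns_cons]
    by_cases hv : v = 0
    · rw [if_pos hv, if_neg hc]; simp
    · rw [if_neg hv]; exact ih _ (by simp)

theorem pvRuns_nil_iff : ∀ (p : List Int), pvRuns [] p = [] ↔ ∀ x ∈ p, x = 0 := by
  intro p
  induction p with
  | nil => simp [pvRuns_nil]
  | cons v t ih =>
    rw [pvRuns_cons]
    by_cases hv : v = 0
    · rw [if_pos hv, if_pos rfl]
      constructor
      · intro h x hx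
        rcases List.mem_cons.mp hx with h1 | h1
        · exact h1.trans hv
        · exact ih.mp h x h1
      · intro h; exact ih.mpr (fun x hx => h x (List.mem_cons_of_mem _ hx))
    · rw [if_neg hv]
      constructor
      · intro h; exact absurd h (pvRuns_cons_ne t ([] ++ [v]) (by simp))
      · intro h; exact absurd (h v List.mem_cons_self) hv

-- ---- the bridge: A's strip-compress equals B's joined runs ----

theorem pv_bridge : ∀ (n : Nat) (t : List Int), t.length ≤ n →
    ((∃ x ∈ t, x ≠ 0) → pvRstrip (pvComp 0 t) ++ [0] = pvJoin (pvRuns [] t)) ∧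
    (∀ (cur : List Int) (v : Int), v ≠ 0 →
      pvJoin (pvRuns (cur ++ [v]) t) = cur ++ [v] ++ pvRstrip (pvComp v t) ++ [0]) := by
  intro n
  induction n with
  | zero =>
    intro t ht
    have ht0 : t = [] := List.length_eq_zero_iff.mp (Nat.le_zero.mp ht)
    subst ht0
    refine ⟨fun h => absurd h (by simp), fun cur v _ => ?_⟩
    rw [pvRuns_nil, if_neg (by simp : ¬(cur ++ [v] = []))]
    simp [pvJoin, pvComp, pvRstrip]
  | succ n ih =>
    intro t ht
    cases t with
    | nil =>
      refine ⟨fun h => absurd h (by simp), fun cur v _ => ?_⟩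
      rw [pvRuns_nil, if_neg (by simp : ¬(cur ++ [v] = []))]
      simp [pvJoin, pvComp, pvRstrip]
    | cons w t' =>
      have ht' : t'.length ≤ n := by simpa using ht
      constructor
      · rintro ⟨x, hx, hxne⟩
        by_cases hw : w = 0
        · subst hw
          have hmem : ∃ y ∈ t', y ≠ 0 := by
            rcases List.mem_cons.mp hx with h1 | h1
            · exact absurd h1 hxne
            · exact ⟨x, h1, hxne⟩
          rw [pvComp_cons, if_pos ⟨rfl, rfl⟩, pvRuns_cons, if_pos rfl, if_pos rfl]
          exact (ih t' ht').1 hmem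
        · rw [pvComp_cons, if_neg (fun hc => hw hc.1), pvRuns_cons, if_neg hw]
          have h2 := (ih t' ht').2 [] w hw
          rw [pvRstrip_cons, if_neg (fun hc => hw hc.2)]
          simp only [List.nil_append] at h2 ⊢
          rw [h2]
          simp
      · intro cur v hv
        by_cases hw : w = 0
        · subst hw
          rw [pvComp_cons, if_neg (fun hc => hv hc.2), pvRuns_cons, if_pos rfl,
              if_neg (by simp : ¬(cur ++ [v] = []))]
          by_cases hz : pvRstrip (pvComp 0 t') = []
          · have hall : ∀ x ∈ t', x = 0 := (pvRstrip_comp_nil_iff t').mp hz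
            rw [(pvRuns_nil_iff t').mpr hall, pvRstrip_cons, if_pos ⟨hz, rfl⟩]
            simp [pvJoin]
          · have hmem : ∃ y ∈ t', y ≠ 0 := by
              by_contra hc
              push_neg at hc
              exact hz ((pvRstrip_comp_nil_iff t').mpr hc)
            have h1 := (ih t' ht').1 hmem
            rw [pvRstrip_cons, if_neg (fun hc => hz hc.1), pvJoin_cons, ← h1]
            simp
        · rw [pvComp_cons, if_neg (fun hc => hw hc.1), pvRuns_cons, if_neg hw]
          have h2 := (ih t' ht').2 (cur ++ [v]) w hw
          rw [h2, pvRstrip_cons, if_neg (fun hc => hw hc.2)]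
          simp

-- ---- port characterisations ----

theorem pv_joinFold : ∀ (rs : List (List Int)) (acc : List Int),
    rs.foldl (fun out r => out ++ r ++ [0]) acc = acc ++ pvJoin rs := by
  intro rs
  induction rs with
  | nil => intro acc; simp [pvJoin]
  | cons r rs ih =>
    intro acc
    rw [List.foldl_cons, ih, pvJoin_cons]
    simp

theorem pv_runsFold : ∀ (q : List Int) (rs : List (List Int)) (cur : List Int),
    pvFinal (q.foldl pvStep (rs, cur)) = rs ++ pvRuns cur q := by
  intro q
  induction q with
  | nil =>
    intro rs cur
    rw [List.foldl_nil, pvRuns_nil]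
    by_cases hc : cur = []
    · subst hc; rw [if_pos rfl]; simp [pvFinal]
    · rw [if_neg hc]; simp [pvFinal, hc]
  | cons v t ih =>
    intro rs cur
    rw [List.foldl_cons, pvRuns_cons]
    by_cases hv : v = 0
    · subst hv
      rw [if_pos rfl]
      by_cases hc : cur = []
      · subst hc
        have hstep : pvStep (rs, ([] : List Int)) 0 = (rs, []) := by simp [pvStep]
        rw [hstep, if_pos rfl, ih rs []]
      · have hstep : pvStep (rs, cur) 0 = (rs ++ [cur], []) := by simp [pvStep, hc]
        rw [hstep, if_neg hc, ih (rs ++ [cur]) []]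
        simp
    · have hstep : pvStep (rs, cur) v = (rs, cur ++ [v]) := by simp [pvStep, hv]
      rw [if_neg hv, hstep, ih rs (cur ++ [v])]

theorem pvB_char (path : List Int) (n_nodes : Int) :
    clean_path_py_alt path n_nodes =
      (if pvRuns [] (path.filter (fun v => decide (0 ≤ v ∧ v < n_nodes))) = [] then ([0, 0] : List Int)
       else [0] ++ pvJoin (pvRuns [] (path.filter (fun v => decide (0 ≤ v ∧ v < n_nodes))))) := by
  have hruns : pvFinal (List.foldl pvStep ([], [])
      (path.filter (fun v => decide (0 ≤ v ∧ v < n_nodes)))) =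
      pvRuns [] (path.filter (fun v => decide (0 ≤ v ∧ v < n_nodes))) :=
    pv_runsFold (path.filter (fun v => decide (0 ≤ v ∧ v < n_nodes))) [] []
  have hmain : (if pvFinal (List.foldl pvStep ([], [])
        (path.filter (fun v => decide (0 ≤ v ∧ v < n_nodes)))) = [] then ([0, 0] : List Int)
      else List.foldl (fun out r => out ++ r ++ [0]) [0]
        (pvFinal (List.foldl pvStep ([], []) (path.filter (fun v => decide (0 ≤ v ∧ v < n_nodes)))))) =
      (if pvRuns [] (path.filter (fun v => decide (0 ≤ v ∧ v < n_nodes))) = [] then ([0, 0] : List Int)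
       else [0] ++ pvJoin (pvRuns [] (path.filter (fun v => decide (0 ≤ v ∧ v < n_nodes))))) := by
    rw [hruns]
    by_cases hr : pvRuns [] (path.filter (fun v => decide (0 ≤ v ∧ v < n_nodes))) = []
    · rw [if_pos hr, if_pos hr]
    · rw [if_neg hr, if_neg hr, pv_joinFold]
  unfold clean_path_py_alt
  rw [PySem.List.foldl_ite_eq_foldl_filter (p := fun v => 0 ≤ v ∧ v < n_nodes)]
  exact hmain

theorem pvA_char (path : List Int) (n_nodes : Int) :
    clean_path_py path n_nodes =
      (if pvRstrip (pvComp 0 (path.filter (fun v => decide (0 ≤ v ∧ v < n_nodes)))) = [] then ([0, 0] : List Int)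
       else 0 :: pvRstrip (pvComp 0 (path.filter (fun v => decide (0 ≤ v ∧ v < n_nodes)))) ++ [0]) := by
  unfold clean_path_py
  rw [PySem.List.foldl_append_ite_eq_filter (p := fun v => 0 ≤ v ∧ v < n_nodes), List.nil_append]
  set pf := path.filter (fun v => decide (0 ≤ v ∧ v < n_nodes)) with hpf
  cases hp : pf with
  | nil => simp [pvComp, pvRstrip]
  | cons h t =>
    simp only
    rw [pv_compactFold t [h] (by simp)]
    have hlast : ([h] : List Int).getLastD 0 = h := rfl
    rw [hlast]
    have hcompact : ([h] ++ pvComp h t : List Int) = h :: pvComp h t := by simp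
    rw [hcompact]
    by_cases hh : h = 0
    · subst hh
      have hcomp0 : pvComp 0 ((0 : Int) :: t) = pvComp 0 t := by
        rw [pvComp_cons, if_pos ⟨rfl, rfl⟩]
      rw [hcomp0]
      by_cases hz : pvRstrip (pvComp 0 t) = []
      · have hrc : pvRstrip ((0 : Int) :: pvComp 0 t) = [] := by
          rw [pvRstrip_cons, if_pos ⟨hz, rfl⟩]
        rcases pvLastNZ_main ((0 : Int) :: pvComp 0 t) with ⟨h1, _⟩ | ⟨h1, h2⟩
        · rw [h1, if_pos rfl, if_pos hz]
        · exfalso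
          rw [hrc, List.take_succ_cons] at h2
          exact List.cons_ne_nil _ _ h2
      · have hrc : pvRstrip ((0 : Int) :: pvComp 0 t) = 0 :: pvRstrip (pvComp 0 t) := by
          rw [pvRstrip_cons, if_neg (fun hc => hz hc.1)]
        have hrcne : pvRstrip ((0 : Int) :: pvComp 0 t) ≠ [] := by rw [hrc]; simp
        rcases pvLastNZ_main ((0 : Int) :: pvComp 0 t) with ⟨_, h2⟩ | ⟨h1, h2⟩
        · exact absurd h2 hrcne
        · have hne : pvLastNZ ((0 : Int) :: pvComp 0 t) ((0 : Int) :: pvComp 0 t).length ≠ -1 := by omega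
          rw [if_neg hne]
          have htoNat : (pvLastNZ ((0 : Int) :: pvComp 0 t) ((0 : Int) :: pvComp 0 t).length + 1).toNat
              = (pvLastNZ ((0 : Int) :: pvComp 0 t) ((0 : Int) :: pvComp 0 t).length).toNat + 1 := by omega
          rw [htoNat, h2, hrc]
          rw [if_neg (show ¬(((0 : Int) :: pvRstrip (pvComp 0 t)).getD 0 0 ≠ 0) from fun hc => hc rfl)]
          have hl : ((0 : Int) :: pvRstrip (pvComp 0 t)).getLastD 0 ≠ 0 := by
            rw [pv_getLastD_cons_ne 0 0 0 hz]
            exact pvRstrip_last_ne _ hz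
          rw [if_pos hl, if_neg hz]
    · have hcomp0 : pvComp 0 (h :: t) = h :: pvComp h t := by
        rw [pvComp_cons, if_neg (fun hc => hh hc.1)]
      rw [hcomp0]
      have hrc : pvRstrip (h :: pvComp h t) = h :: pvRstrip (pvComp h t) := by
        rw [pvRstrip_cons, if_neg (fun hc => hh hc.2)]
      have hrcne : pvRstrip (h :: pvComp h t) ≠ [] := by rw [hrc]; simp
      rcases pvLastNZ_main (h :: pvComp h t) with ⟨_, h2⟩ | ⟨h1, h2⟩
      · exact absurd h2 hrcne
      · have hne : pvLastNZ (h :: pvComp h t) (h :: pvComp h t).length ≠ -1 := by omega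
        rw [if_neg hne]
        have htoNat : (pvLastNZ (h :: pvComp h t) (h :: pvComp h t).length + 1).toNat
            = (pvLastNZ (h :: pvComp h t) (h :: pvComp h t).length).toNat + 1 := by omega
        rw [htoNat, h2, hrc]
        rw [if_pos (show (h :: pvRstrip (pvComp h t)).getD 0 0 ≠ 0 from fun hc => hh hc)]
        have hl : ((0 : Int) :: h :: pvRstrip (pvComp h t)).getLastD 0 ≠ 0 := by
          by_cases hz : pvRstrip (pvComp h t) = []
          · rw [hz]
            simpa [List.getLastD] using hh
          · rw [pv_getLastD_cons_ne 0 0 0 (by simp), pv_getLastD_cons_ne h 0 0 hz]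
            exact pvRstrip_last_ne _ hz
        rw [if_pos hl, if_neg (by simp : ¬(h :: pvRstrip (pvComp h t) = []))]

-- ===== VERDICT (by name: the statement is the Claim_ definition above) =====
theorem clean_path_py_spec : Claim_equal_clean_path_py := by
  intro path n_nodes _
  unfold Spec_clean_path_py
  rw [pvA_char, pvB_char]
  set pf := path.filter (fun v => decide (0 ≤ v ∧ v < n_nodes)) with hpf
  by_cases hz : ∀ x ∈ pf, x = 0
  · rw [if_pos ((pvRstrip_comp_nil_iff pf).mpr hz), if_pos ((pvRuns_nil_iff pf).mpr hz)]
  · have hex : ∃ x ∈ pf, x ≠ 0 := by push_neg at hz; exact hz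
    have h1 := (pv_bridge pf.length pf le_rfl).1 hex
    rw [if_neg (fun hc => hz ((pvRstrip_comp_nil_iff pf).mp hc)),
        if_neg (fun hc => hz ((pvRuns_nil_iff pf).mp hc)), ← h1]
    simp
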